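-- pv_equiv track=rewrite | github.com/chin-mehta/Rep_Drex | scf_evaluator.py | group_by_run
-- ===== SOURCE A (Python) =====
-- def group_by_run(results):
--     g = {}
--     for r in results:
--         g.setdefault(r["run_name"], []).append(r)
--     for key in g:
--         seen, out = set(), []
--         for r in g[key]:
--             if r["threshold"] not in seen:
--                 seen.add(r["threshold"]); out.append(r)
--         g[key] = out
--     return g
-- ===== SOURCE B (Python) =====
-- def group_by_run(results):
--     # Single pass: group and dedup-by-threshold fused, with per-run seen-sets.
--     g, seen = {}, {}
--     for r in results:
--         k = r["run_name"]
--         t = r["threshold"]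
--         if k not in g:
--             g[k] = []
--             seen[k] = set()
--         if t not in seen[k]:
--             seen[k].add(t)
--             g[k].append(r)
--     return g
-- ===== Notes on version B (the rewrite author's own statement) =====
-- stated objective: alternative
-- what changed: A groups all rows by run_name in one pass and then runs a second dedup-by-threshold pass over every group; B fuses this into a single traversal of results, maintaining per-run seen-threshold sets alongside the output groups.
import Mathlib
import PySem

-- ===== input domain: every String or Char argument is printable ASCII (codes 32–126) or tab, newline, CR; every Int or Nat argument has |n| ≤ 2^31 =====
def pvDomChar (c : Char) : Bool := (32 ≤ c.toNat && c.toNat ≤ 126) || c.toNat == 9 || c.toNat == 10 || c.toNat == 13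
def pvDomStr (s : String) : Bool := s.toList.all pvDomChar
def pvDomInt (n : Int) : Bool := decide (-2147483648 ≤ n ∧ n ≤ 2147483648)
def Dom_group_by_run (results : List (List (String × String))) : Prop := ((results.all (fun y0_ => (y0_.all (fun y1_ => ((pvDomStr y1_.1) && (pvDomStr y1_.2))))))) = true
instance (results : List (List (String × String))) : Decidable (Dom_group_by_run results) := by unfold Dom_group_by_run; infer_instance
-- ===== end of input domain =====

-- B fuses A's group-then-dedup two-pass structure into one traversal with per-run seen-sets; equivalence is about the return value only.

-- ===== PORT A =====
-- Python dict lookup r[k] on a row: first match; Pre_ guarantees the key is present, so the "" default is never reached inside Pre_.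
def pvGetS (r : List (String × String)) (k : String) : String :=
  (((r.find? (fun p => p.1 == k)).map (·.2)).getD "")

def pvKey (r : List (String × String)) : String := pvGetS r "run_name"
def pvThr (r : List (String × String)) : String := pvGetS r "threshold"

-- first loop: g.setdefault(r["run_name"], []).append(r)  ==  g[k] = g.get(k, []) + [r]  ==  modify
def pvGrp (results : List (List (String × String))) : PySem.Dict String (List (List (String × String))) :=
  results.foldl (fun g r => g.modify (pvKey r) [] (· ++ [r])) PySem.Dict.empty

-- body of the second loop: seen/out accumulation over one group
def pvDDStep (st : PySem.Set String × List (List (String × String))) (r : List (String × String)) :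
    PySem.Set String × List (List (String × String)) :=
  if PySem.Set.contains st.1 (pvThr r) then st else (PySem.Set.add st.1 (pvThr r), st.2 ++ [r])

-- second loop: for key in g: g[key] = out  (overwrite keeps each key's position = map over items)
def group_by_run (results : List (List (String × String))) : List (String × List (List (String × String))) :=
  ((pvGrp results).items).map (fun p => (p.1, (p.2.foldl pvDDStep (PySem.Set.empty, [])).2))

-- ===== PORT B =====
def pvBStep (st : PySem.Dict String (List (List (String × String))) × PySem.Dict String (PySem.Set String))
    (r : List (String × String)) :
    PySem.Dict String (List (List (String × String))) × PySem.Dict String (PySem.Set String) :=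
  let k := pvKey r
  let g := if st.1.contains k then st.1 else st.1.insert k []
  let seen := if st.1.contains k then st.2 else st.2.insert k PySem.Set.empty
  let s := seen.getD k PySem.Set.empty
  if PySem.Set.contains s (pvThr r) then (g, seen)
  else (g.modify k [] (· ++ [r]), seen.insert k (PySem.Set.add s (pvThr r)))

def group_by_run_alt (results : List (List (String × String))) : List (String × List (List (String × String))) :=
  ((results.foldl pvBStep (PySem.Dict.empty, PySem.Dict.empty)).1).items

-- ===== PRECONDITION & SPEC =====
-- Pre_ excludes exactly the rows on which Python A raises KeyError: a row without a "run_name" or "threshold" key.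
def Pre_group_by_run (results : List (List (String × String))) : Prop :=
  ∀ r ∈ results, "run_name" ∈ r.map (·.1) ∧ "threshold" ∈ r.map (·.1)
instance (results : List (List (String × String))) : Decidable (Pre_group_by_run results) := by
  unfold Pre_group_by_run; infer_instance

def pvWitness_group_by_run : (List (List (String × String))) :=
  [[("run_name", "a"), ("threshold", "1")], [("run_name", "a"), ("threshold", "1")]]

def Spec_group_by_run (results : List (List (String × String))) (out : List (String × List (List (String × String)))) : Prop := out = group_by_run_alt results
instance (results : List (List (String × String))) (out : List (String × List (List (String × String)))) : Decidable (Spec_group_by_run results out) := by unfold Spec_group_by_run; infer_instance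

-- ===== CLAIM (what is proved, stated in full; the proofs are below) =====
def Claim_equal_group_by_run : Prop := ∀ (results : List (List (String × String))), Dom_group_by_run results → Pre_group_by_run results → Spec_group_by_run results (group_by_run results)

-- ===== LEMMAS AND PROOFS =====

-- dedup-by-threshold of one group, and the seen-set it accumulates (proof-side names)
def pvDD (l : List (List (String × String))) : List (List (String × String)) :=
  (l.foldl pvDDStep (PySem.Set.empty, [])).2
def pvSeen (l : List (List (String × String))) : PySem.Set String :=
  (l.foldl pvDDStep (PySem.Set.empty, [])).1

lemma pvDD_append (l : List (List (String × String))) (r : List (String × String)) :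
    pvDD (l ++ [r]) = if PySem.Set.contains (pvSeen l) (pvThr r) then pvDD l else pvDD l ++ [r] := by
  simp [pvDD, pvSeen, List.foldl_append, pvDDStep]
  split <;> simp

lemma pvSeen_append (l : List (List (String × String))) (r : List (String × String)) :
    pvSeen (l ++ [r]) = if PySem.Set.contains (pvSeen l) (pvThr r) then pvSeen l
      else PySem.Set.add (pvSeen l) (pvThr r) := by
  simp [pvSeen, List.foldl_append, pvDDStep]
  split <;> simp

lemma pvGrp_getD_aux (rs : List (List (String × String)))
    (d : PySem.Dict String (List (List (String × String)))) (c : String) :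
    (rs.foldl (fun g r => g.modify (pvKey r) [] (· ++ [r])) d).getD c []
      = d.getD c [] ++ rs.filter (fun r => pvKey r == c) := by
  induction rs generalizing d with
  | nil => simp
  | cons r rs ih =>
    simp only [List.foldl_cons, ih, List.filter_cons]
    rw [PySem.Dict.getD_modify]
    by_cases h : pvKey r = c
    · simp [h]
    · simp [h, Ne.symm h, beq_iff_eq]

lemma pvGrp_keys (rs : List (List (String × String))) :
    (pvGrp rs).keys = PySem.Set.ofList (rs.map pvKey) := by
  unfold pvGrp
  rw [PySem.Dict.keys_foldl_modify_key]
  simp [PySem.Set.ofList_eq_foldl, PySem.Set.update]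

lemma pvGrp_nodup (rs : List (List (String × String))) : (pvGrp rs).keys.Nodup := by
  unfold pvGrp
  exact PySem.Dict.nodup_keys_foldl_modify_key rs pvKey [] (fun _ r => (· ++ [r])) _ PySem.Dict.nodup_keys_empty

-- A's closed form
lemma pvA_eq (rs : List (List (String × String))) :
    group_by_run rs
      = (PySem.Set.ofList (rs.map pvKey)).map
          (fun k => (k, pvDD (rs.filter (fun r => pvKey r == k)))) := by
  unfold group_by_run
  rw [PySem.Dict.items_eq_map_keys (pvGrp rs) (pvGrp_nodup rs) []]
  rw [List.map_map, pvGrp_keys]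
  refine List.map_congr_left (fun k _ => ?_)
  simp only [Function.comp]
  rw [show (pvGrp rs).getD k [] = _ from pvGrp_getD_aux rs PySem.Dict.empty k]
  simp [pvDD]

lemma ofList_snoc (l : List String) (x : String) :
    PySem.Set.ofList (l ++ [x]) = PySem.Set.add (PySem.Set.ofList l) x := by
  simp [PySem.Set.ofList_eq_foldl, List.foldl_append]

lemma add_of_not_mem (l : List String) (x : String) (h : x ∉ l) :
    PySem.Set.add (PySem.Set.ofList l) x = PySem.Set.ofList l ++ [x] := by
  simp [PySem.Set.add, PySem.Set.contains, PySem.Set.mem_ofList, h]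

lemma add_of_mem (l : List String) (x : String) (h : x ∈ l) :
    PySem.Set.add (PySem.Set.ofList l) x = PySem.Set.ofList l := by
  simp [PySem.Set.add, PySem.Set.contains, PySem.Set.mem_ofList, h]

lemma pvB_inv (rs : List (List (String × String))) :
    (rs.foldl pvBStep (PySem.Dict.empty, PySem.Dict.empty)).1.keys = PySem.Set.ofList (rs.map pvKey)
    ∧ (rs.foldl pvBStep (PySem.Dict.empty, PySem.Dict.empty)).2.keys
        = (rs.foldl pvBStep (PySem.Dict.empty, PySem.Dict.empty)).1.keys
    ∧ (rs.foldl pvBStep (PySem.Dict.empty, PySem.Dict.empty)).1.keys.Nodup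
    ∧ (∀ c, (rs.foldl pvBStep (PySem.Dict.empty, PySem.Dict.empty)).1.getD c []
        = pvDD (rs.filter (fun r => pvKey r == c)))
    ∧ (∀ c, (rs.foldl pvBStep (PySem.Dict.empty, PySem.Dict.empty)).2.getD c PySem.Set.empty
        = pvSeen (rs.filter (fun r => pvKey r == c))) := by
  induction rs using List.reverseRecOn with
  | nil => simp [pvDD, pvSeen]
  | append_singleton rs r ih =>
    obtain ⟨hk, hsk, hnd, hg, hs⟩ := ih
    set st := rs.foldl pvBStep (PySem.Dict.empty, PySem.Dict.empty) with hst
    have hfold : (rs ++ [r]).foldl pvBStep (PySem.Dict.empty, PySem.Dict.empty) = pvBStep st r := by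
      rw [List.foldl_append]; rfl
    have hfilter : ∀ c, (rs ++ [r]).filter (fun r' => pvKey r' == c)
        = rs.filter (fun r' => pvKey r' == c) ++ (if pvKey r = c then [r] else []) := by
      intro c; by_cases h : pvKey r = c <;> simp [List.filter_append, h]
    rw [hfold]
    by_cases hc : st.1.contains (pvKey r) = true
    · -- key already present
      have hmem : pvKey r ∈ rs.map pvKey := by
        have := (PySem.Dict.contains_iff_mem_keys st.1 (pvKey r)).mp hc
        rw [hk] at this; exact (PySem.Set.mem_ofList _ _).mp this
      have hsc : st.2.contains (pvKey r) = true := by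
        rw [PySem.Dict.contains_iff_mem_keys, hsk]
        exact (PySem.Dict.contains_iff_mem_keys st.1 (pvKey r)).mp hc
      have hkeys' : PySem.Set.ofList ((rs ++ [r]).map pvKey) = PySem.Set.ofList (rs.map pvKey) := by
        rw [List.map_append, List.map_singleton, ofList_snoc, add_of_mem _ _ hmem]
      by_cases ht : PySem.Set.contains (pvSeen (rs.filter (fun r' => pvKey r' == pvKey r))) (pvThr r) = true
      · have hstep : pvBStep st r = st := by
          simp only [pvBStep, hc, if_true]
          rw [hs (pvKey r), ht]
          simp
        rw [hstep]
        refine ⟨by rw [hk, hkeys'], hsk, hnd, fun c => ?_, fun c => ?_⟩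
        · rw [hfilter c]
          by_cases h : pvKey r = c
          · subst h; rw [if_pos rfl, pvDD_append, ht, if_pos rfl]; exact hg _
          · simp only [if_neg h, List.append_nil]; exact hg c
        · rw [hfilter c]
          by_cases h : pvKey r = c
          · subst h; rw [if_pos rfl, pvSeen_append, ht, if_pos rfl]; exact hs _
          · simp only [if_neg h, List.append_nil]; exact hs c
      · have ht' : PySem.Set.contains (pvSeen (rs.filter (fun r' => pvKey r' == pvKey r))) (pvThr r) = false := by
          simpa using ht
        have hstep : pvBStep st r
            = (st.1.modify (pvKey r) [] (· ++ [r]),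
               st.2.insert (pvKey r)
                 (PySem.Set.add (pvSeen (rs.filter (fun r' => pvKey r' == pvKey r))) (pvThr r))) := by
          simp only [pvBStep, hc, if_true]
          rw [hs (pvKey r), ht']
          simp
        rw [hstep]
        have hgkeys : (st.1.modify (pvKey r) [] (· ++ [r])).keys = st.1.keys := by
          rw [PySem.Dict.keys_modify, PySem.Dict.keys_insert_of_contains _ _ hc]
        refine ⟨?_, ?_, ?_, fun c => ?_, fun c => ?_⟩
        · rw [hgkeys, hk, hkeys']
        · rw [hgkeys, PySem.Dict.keys_insert_of_contains _ _ hsc, hsk]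
        · rw [hgkeys]; exact hnd
        · rw [hfilter c, PySem.Dict.getD_modify]
          by_cases h : pvKey r = c
          · subst h; rw [if_pos rfl, if_pos rfl, pvDD_append, ht', if_neg (by simp), hg]
          · rw [if_neg (Ne.symm h), if_neg h, List.append_nil]; exact hg c
        · rw [hfilter c, PySem.Dict.getD_insert]
          by_cases h : pvKey r = c
          · subst h; rw [if_pos rfl, if_pos rfl, pvSeen_append, ht', if_neg (by simp)]
          · rw [if_neg (Ne.symm h), if_neg h, List.append_nil]; exact hs c
    · -- new key
      have hc' : st.1.contains (pvKey r) = false := by simpa using hc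
      have hnotmem : pvKey r ∉ rs.map pvKey := by
        intro hmem
        exact hc ((PySem.Dict.contains_iff_mem_keys st.1 (pvKey r)).mpr
          (hk ▸ (PySem.Set.mem_ofList _ _).mpr hmem))
      have hsc' : st.2.contains (pvKey r) = false := by
        rw [Bool.eq_false_iff]; intro h
        exact hc ((PySem.Dict.contains_iff_mem_keys st.1 (pvKey r)).mpr
          (hsk ▸ (PySem.Dict.contains_iff_mem_keys st.2 (pvKey r)).mp h))
      have hfe : rs.filter (fun r' => pvKey r' == pvKey r) = [] := by
        rw [List.filter_eq_nil_iff]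
        intro a ha hba
        exact hnotmem ((beq_iff_eq.mp hba) ▸ List.mem_map_of_mem ha)
      have hnotkeys : pvKey r ∉ st.1.keys := by
        rw [hk]; intro h; exact hnotmem ((PySem.Set.mem_ofList _ _).mp h)
      have hstep : pvBStep st r
          = ((st.1.insert (pvKey r) []).modify (pvKey r) [] (· ++ [r]),
             st.2.insert (pvKey r) (PySem.Set.add PySem.Set.empty (pvThr r))) := by
        simp only [pvBStep, hc', if_false, Bool.false_eq_true]
        rw [PySem.Dict.getD_insert_self]
        have : PySem.Set.contains PySem.Set.empty (pvThr r) = false := by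
          simp [PySem.Set.empty, PySem.Set.contains]
        rw [this]
        simp [PySem.Dict.insert_insert_self]
      rw [hstep]
      have hgkeys : ((st.1.insert (pvKey r) []).modify (pvKey r) [] (· ++ [r])).keys
          = st.1.keys ++ [pvKey r] := by
        rw [PySem.Dict.keys_modify, PySem.Dict.insert_insert_self,
          PySem.Dict.keys_insert_of_not_contains _ _ hc']
      refine ⟨?_, ?_, ?_, fun c => ?_, fun c => ?_⟩
      · rw [hgkeys, hk, List.map_append, List.map_singleton, ofList_snoc, add_of_not_mem _ _ hnotmem]
      · rw [hgkeys, PySem.Dict.keys_insert_of_not_contains _ _ hsc', hsk]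
      · rw [hgkeys]
        simp [List.nodup_append, hnd]
        intro a ha h
        exact hnotkeys (h ▸ ha)
      · rw [hfilter c, PySem.Dict.getD_modify]
        by_cases h : pvKey r = c
        · subst h
          rw [if_pos rfl, if_pos rfl, hfe, PySem.Dict.getD_insert_self]
          simp [pvDD, pvDDStep, PySem.Set.contains, PySem.Set.empty]
        · rw [if_neg (Ne.symm h), if_neg h, List.append_nil, PySem.Dict.getD_insert,
            if_neg (Ne.symm h)]
          exact hg c
      · rw [hfilter c, PySem.Dict.getD_insert]
        by_cases h : pvKey r = c
        · subst h
          rw [if_pos rfl, if_pos rfl, hfe]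
          simp [pvSeen, pvDDStep, PySem.Set.contains, PySem.Set.empty]
        · rw [if_neg (Ne.symm h), if_neg h, List.append_nil]
          exact hs c

-- ===== VERDICT (by name: the statement is the Claim_ definition above) =====
theorem group_by_run_spec : Claim_equal_group_by_run := by
  intro rs _ _
  unfold Spec_group_by_run
  obtain ⟨hk, _, hnd, hg, _⟩ := pvB_inv rs
  rw [pvA_eq rs]
  unfold group_by_run_alt
  rw [PySem.Dict.items_eq_map_keys _ hnd [], hk]
  exact List.map_congr_left (fun k _ => by rw [hg k])
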